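-- pv_equiv track=rewrite | github.com/kaushiksaravanan/Leetcode-practice | 2357-make-array-zero-by-subtracting-equal-amounts/2357-make-array-zero-by-subtracting-equal-amounts.py | check
-- ===== SOURCE A (Python) =====
-- def check(nums):
--     d=0
--     l=0
--     for i in nums:
--         if i<=0:
--             l+=1
--         d+=1
--     return l!=d
-- ===== SOURCE B (Python) =====
-- def check(nums):
--     if not nums:
--         return False
--     return sorted(nums)[-1] > 0
-- ===== Notes on version B (the rewrite author's own statement) =====
-- stated objective: alternative
-- what changed: Replaced the two-counter scan (count all elements and non-positive ones, compare) with sort-then-inspect: B sorts the list and tests whether its last (largest) element is positive, which is equivalent because some element is positive iff the maximum is.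
import Mathlib
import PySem

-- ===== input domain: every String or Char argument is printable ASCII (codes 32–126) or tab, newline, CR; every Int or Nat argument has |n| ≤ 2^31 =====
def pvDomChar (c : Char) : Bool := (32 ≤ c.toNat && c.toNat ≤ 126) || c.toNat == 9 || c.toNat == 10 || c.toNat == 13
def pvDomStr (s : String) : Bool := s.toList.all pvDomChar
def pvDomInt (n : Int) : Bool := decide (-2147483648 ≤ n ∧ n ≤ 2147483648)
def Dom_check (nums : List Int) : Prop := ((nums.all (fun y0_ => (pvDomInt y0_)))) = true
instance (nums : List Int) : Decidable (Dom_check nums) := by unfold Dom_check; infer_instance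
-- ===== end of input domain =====

-- B replaces A's two-counter scan with sort-then-inspect: sort the list and test whether
-- the last (largest) element is positive. Different algorithm (O(n log n) sort), not faster.


-- ===== PORT A =====
-- literal port: d counts all elements, l counts the non-positive ones, result l != d
def check (nums : List Int) : Bool :=
  let st := nums.foldl (fun (st : Int × Int) (i : Int) =>
    let (d, l) := st
    (d + 1, if i ≤ 0 then l + 1 else l)) (0, 0)
  st.2 != st.1

-- ===== PORT B =====
-- port of Source B: empty → False, else sorted(nums)[-1] > 0
def check_alt (nums : List Int) : Bool :=
  if nums = [] then false
  else
    match PySem.List.pyGet? (PySem.List.sorted nums (fun x => x) false) (-1) with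
    | some m => decide (0 < m)
    | none => false

-- ===== PRECONDITION & SPEC =====
def Spec_check (nums : List Int) (out : Bool) : Prop := out = check_alt nums
instance (nums : List Int) (out : Bool) : Decidable (Spec_check nums out) := by unfold Spec_check; infer_instance

-- ===== CLAIM =====
def Claim_equal_check : Prop := ∀ (nums : List Int), Dom_check nums → Spec_check nums (check nums)

-- ===== LEMMAS AND PROOFS =====

-- A's loop invariant: d gains the length, l gains the count of non-positive elements
theorem check_fold (nums : List Int) (d l : Int) :
    nums.foldl (fun (st : Int × Int) (i : Int) =>
      let (d, l) := st
      (d + 1, if i ≤ 0 then l + 1 else l)) (d, l)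
    = (d + nums.length, l + ((nums.filter (fun i => i ≤ 0)).length : Int)) := by
  induction nums generalizing d l with
  | nil => simp
  | cons x xs ih =>
    simp only [List.foldl_cons, List.filter_cons]
    by_cases h : x ≤ 0 <;>
      simp only [h, decide_true, decide_false, ite_true, ite_false, ih, List.length_cons] <;>
      simp only [Prod.mk.injEq] <;> constructor <;> push_cast <;> ring

-- A returns true iff some element is positive
theorem check_iff (nums : List Int) : check nums = true ↔ ∃ x ∈ nums, 0 < x := by
  unfold check
  simp only [check_fold]
  rw [bne_iff_ne]
  induction nums with
  | nil => simp
  | cons x xs ih =>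
    have hle : ((xs.filter (fun i => i ≤ 0)).length : Int) ≤ xs.length :=
      Int.ofNat_le.mpr (List.length_filter_le _ _)
    simp only [List.filter_cons, List.mem_cons]
    by_cases h : x ≤ 0
    · simp only [h, decide_true, ite_true, List.length_cons]
      constructor
      · intro hne
        obtain ⟨y, hy, hy0⟩ := ih.mp (by push_cast at hne ⊢; omega)
        exact ⟨y, Or.inr hy, hy0⟩
      · rintro ⟨y, hy | hy, hy0⟩
        · omega
        · have := ih.mpr ⟨y, hy, hy0⟩; push_cast at this ⊢; omega
    · have hf : (decide (x ≤ 0)) = false := by simp [h]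
      simp only [hf, Bool.false_eq_true, if_false, List.length_cons]
      constructor
      · intro _; exact ⟨x, Or.inl rfl, by omega⟩
      · intro _; push_cast; omega

-- B returns true iff some element is positive: the last element of the sorted list is its maximum
theorem check_alt_iff (nums : List Int) : check_alt nums = true ↔ ∃ x ∈ nums, 0 < x := by
  unfold check_alt
  by_cases hnil : nums = []
  · simp [hnil]
  · simp only [hnil, if_false]
    set s := PySem.List.sorted nums (fun x => x) false with hs
    have hsnil : s ≠ [] := by
      rw [hs]; simpa [PySem.List.sorted_eq_nil_iff] using hnil
    rw [PySem.List.pyGet?_neg_one, List.getLast?_eq_some_getLast hsnil]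
    have hmem : s.getLast hsnil ∈ s := List.getLast_mem hsnil
    have hperm : s.Perm nums := PySem.List.sorted_perm nums (fun x => x) false
    have hmax : ∀ y ∈ s, y ≤ s.getLast hsnil := by
      intro y hy
      have hp : s.Pairwise (fun a b => a ≤ b) := by
        simpa using PySem.List.sorted_pairwise (xs := nums) (key := fun x : Int => x)
      obtain ⟨i, hi, hyi⟩ := List.getElem_of_mem hy
      have hlast : s.getLast hsnil = s[s.length - 1] := List.getLast_eq_getElem hsnil
      rcases Nat.lt_or_ge i (s.length - 1) with hlt | hge
      · have := List.pairwise_iff_getElem.mp hp i (s.length - 1) hi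
          (by omega) hlt
        rw [hlast]; omega
      · have : i = s.length - 1 := by omega
        subst this; rw [hlast]; omega
    constructor
    · intro h1
      refine ⟨s.getLast hsnil, hperm.mem_iff.mp hmem, by simpa using h1⟩
    · rintro ⟨y, hy, hy0⟩
      have := hmax y (hperm.mem_iff.mpr hy)
      simp only [decide_eq_true_eq]
      omega

-- ===== VERDICT =====
theorem check_spec : Claim_equal_check := by
  intro nums _
  unfold Spec_check
  rw [Bool.eq_iff_iff, check_iff, check_alt_iff]
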